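-- pv_equiv track=rewrite | github.com/hisr2024/MindVibe | backend/services/indian_data_sources.py | get_quick_gita_wisdom
-- ===== SOURCE A (Python) =====
-- from typing import Any
--
-- def get_quick_gita_wisdom(mood: str) -> dict[str, Any]:
--     """
--     Get quick Gita wisdom based on current mood/emotion.
--
--     Args:
--         mood: User's current mood/emotion
--
--     Returns:
--         Quick Gita-based wisdom and practice
--     """
--     mood_lower = mood.lower()
--
--     if any(word in mood_lower for word in ["anxious", "worried", "nervous"]):
--         return {
--             "verse": "2.47",
--             "sanskrit": "कर्मण्येवाधिकारस्ते मा फलेषु कदाचन",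
--             "meaning": "You have the right to work only, never to its fruits",
--             "practice": "Release the weight of outcomes. Focus only on this present action.",
--             "affirmation": "I do my best and release the rest.",
--         }
--
--     elif any(word in mood_lower for word in ["sad", "hopeless", "down"]):
--         return {
--             "verse": "6.5",
--             "sanskrit": "उद्धरेदात्मनात्मानं नात्मानमवसादयेत्",
--             "meaning": "Lift yourself by your Self; do not let yourself sink",
--             "practice": "Be your own friend. Speak to yourself with compassion.",
--             "affirmation": "I have the power to uplift myself.",
--         }
--
--     elif any(word in mood_lower for word in ["angry", "frustrated"]):
--         return {
--             "verse": "2.56",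
--             "sanskrit": "वीतरागभयक्रोधः स्थितधीर्मुनिरुच्यते",
--             "meaning": "Free from attachment, fear, and anger - this is steady wisdom",
--             "practice": "Pause. Identify the frustrated desire beneath the anger.",
--             "affirmation": "I choose peace over reaction.",
--         }
--
--     elif any(word in mood_lower for word in ["stressed", "overwhelmed"]):
--         return {
--             "verse": "2.48",
--             "sanskrit": "समत्वं योग उच्यते",
--             "meaning": "Equanimity is yoga",
--             "practice": "Whatever comes, meet it with balance. This too shall pass.",
--             "affirmation": "I remain centered in the midst of change.",
--         }
--
--     elif any(word in mood_lower for word in ["peaceful", "content", "grateful"]):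
--         return {
--             "verse": "2.65",
--             "sanskrit": "प्रसादे सर्वदुःखानां हानिरस्योपजायते",
--             "meaning": "In serenity, all sorrows end",
--             "practice": "Rest in this peace. It is your natural state.",
--             "affirmation": "Peace is my true nature.",
--         }
--
--     else:
--         return {
--             "verse": "2.71",
--             "sanskrit": "विहाय कामान्यः सर्वान्पुमांश्चरति निःस्पृहः",
--             "meaning": "One who moves without craving attains peace",
--             "practice": "Let go of excessive wanting. Find contentment in this moment.",
--             "affirmation": "I am complete as I am.",
--         }
-- ===== SOURCE B (Python) =====
-- WISDOMS = [
--     {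
--         "verse": "2.47",
--         "sanskrit": "कर्मण्येवाधिकारस्ते मा फलेषु कदाचन",
--         "meaning": "You have the right to work only, never to its fruits",
--         "practice": "Release the weight of outcomes. Focus only on this present action.",
--         "affirmation": "I do my best and release the rest.",
--     },
--     {
--         "verse": "6.5",
--         "sanskrit": "उद्धरेदात्मनात्मानं नात्मानमवसादयेत्",
--         "meaning": "Lift yourself by your Self; do not let yourself sink",
--         "practice": "Be your own friend. Speak to yourself with compassion.",
--         "affirmation": "I have the power to uplift myself.",
--     },
--     {
--         "verse": "2.56",
--         "sanskrit": "वीतरागभयक्रोधः स्थितधीर्मुनिरुच्यते",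
--         "meaning": "Free from attachment, fear, and anger - this is steady wisdom",
--         "practice": "Pause. Identify the frustrated desire beneath the anger.",
--         "affirmation": "I choose peace over reaction.",
--     },
--     {
--         "verse": "2.48",
--         "sanskrit": "समत्वं योग उच्यते",
--         "meaning": "Equanimity is yoga",
--         "practice": "Whatever comes, meet it with balance. This too shall pass.",
--         "affirmation": "I remain centered in the midst of change.",
--     },
--     {
--         "verse": "2.65",
--         "sanskrit": "प्रसादे सर्वदुःखानां हानिरस्योपजायते",
--         "meaning": "In serenity, all sorrows end",
--         "practice": "Rest in this peace. It is your natural state.",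
--         "affirmation": "Peace is my true nature.",
--     },
--     {
--         "verse": "2.71",
--         "sanskrit": "विहाय कामान्यः सर्वान्पुमांश्चरति निःस्पृहः",
--         "meaning": "One who moves without craving attains peace",
--         "practice": "Let go of excessive wanting. Find contentment in this moment.",
--         "affirmation": "I am complete as I am.",
--     },
-- ]
--
-- # keyword -> priority (index into WISDOMS); keyword lengths are all in [3, 11]
-- PRIO = {
--     "anxious": 0, "worried": 0, "nervous": 0,
--     "sad": 1, "hopeless": 1, "down": 1,
--     "angry": 2, "frustrated": 2,
--     "stressed": 3, "overwhelmed": 3,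
--     "peaceful": 4, "content": 4, "grateful": 4,
-- }
--
--
-- def get_quick_gita_wisdom(mood: str) -> dict:
--     """Multi-pattern scan: enumerate the mood's substrings of keyword lengths
--     (3..11), look each up in a keyword->priority dict, and keep the minimum
--     priority found; WISDOMS[5] is the no-match default."""
--     mood_lower = mood.lower()
--     n = len(mood_lower)
--     best = 5
--     for i in range(n):
--         for j in range(i + 3, min(i + 11, n) + 1):
--             p = PRIO.get(mood_lower[i:j], 5)
--             if p < best:
--                 best = p
--     return WISDOMS[best]
-- ===== Notes on version B (the rewrite author's own statement) =====
-- stated objective: alternative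
-- what changed: B inverts the search direction: instead of testing each keyword for containment in the mood string (A's if/elif chain of any(...) scans), it enumerates the mood's substrings of keyword lengths (3..11) in one pass, looks each up in a keyword-to-priority dict, keeps the minimum priority found, and indexes a wisdom table with it.
import Mathlib
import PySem

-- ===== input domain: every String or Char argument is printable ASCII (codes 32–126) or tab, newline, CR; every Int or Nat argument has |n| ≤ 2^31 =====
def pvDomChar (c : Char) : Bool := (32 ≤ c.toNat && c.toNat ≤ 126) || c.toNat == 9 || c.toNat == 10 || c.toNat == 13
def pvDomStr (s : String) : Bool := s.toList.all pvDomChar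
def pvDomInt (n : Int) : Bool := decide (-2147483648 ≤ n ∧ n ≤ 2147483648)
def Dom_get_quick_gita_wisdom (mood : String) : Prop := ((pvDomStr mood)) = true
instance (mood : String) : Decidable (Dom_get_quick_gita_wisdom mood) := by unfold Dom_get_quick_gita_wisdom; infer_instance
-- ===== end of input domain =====

-- B inverts the search: instead of testing each keyword for containment in the mood, it
-- enumerates the mood's substrings of keyword lengths once, looks each up in a
-- keyword→priority dict, and keeps the minimum priority (objective: alternative; same cost).

-- The six wisdom dicts (shared literals of both sources, named once for readability)
def pvW247 : List (String × String) :=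
  [("verse", "2.47"),
   ("sanskrit", "कर्मण्येवाधिकारस्ते मा फलेषु कदाचन"),
   ("meaning", "You have the right to work only, never to its fruits"),
   ("practice", "Release the weight of outcomes. Focus only on this present action."),
   ("affirmation", "I do my best and release the rest.")]
def pvW65 : List (String × String) :=
  [("verse", "6.5"),
   ("sanskrit", "उद्धरेदात्मनात्मानं नात्मानमवसादयेत्"),
   ("meaning", "Lift yourself by your Self; do not let yourself sink"),
   ("practice", "Be your own friend. Speak to yourself with compassion."),
   ("affirmation", "I have the power to uplift myself.")]
def pvW256 : List (String × String) :=
  [("verse", "2.56"),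
   ("sanskrit", "वीतरागभयक्रोधः स्थितधीर्मुनिरुच्यते"),
   ("meaning", "Free from attachment, fear, and anger - this is steady wisdom"),
   ("practice", "Pause. Identify the frustrated desire beneath the anger."),
   ("affirmation", "I choose peace over reaction.")]
def pvW248 : List (String × String) :=
  [("verse", "2.48"),
   ("sanskrit", "समत्वं योग उच्यते"),
   ("meaning", "Equanimity is yoga"),
   ("practice", "Whatever comes, meet it with balance. This too shall pass."),
   ("affirmation", "I remain centered in the midst of change.")]
def pvW265 : List (String × String) :=
  [("verse", "2.65"),
   ("sanskrit", "प्रसादे सर्वदुःखानां हानिरस्योपजायते"),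
   ("meaning", "In serenity, all sorrows end"),
   ("practice", "Rest in this peace. It is your natural state."),
   ("affirmation", "Peace is my true nature.")]
def pvW271 : List (String × String) :=
  [("verse", "2.71"),
   ("sanskrit", "विहाय कामान्यः सर्वान्पुमांश्चरति निःस्पृहः"),
   ("meaning", "One who moves without craving attains peace"),
   ("practice", "Let go of excessive wanting. Find contentment in this moment."),
   ("affirmation", "I am complete as I am.")]

-- ===== PORT A =====
def get_quick_gita_wisdom (mood : String) : List (String × String) :=
  let mood_lower := PySem.Str.lower mood
  if (["anxious", "worried", "nervous"].any fun word => PySem.Str.isIn word mood_lower) then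
    pvW247
  else if (["sad", "hopeless", "down"].any fun word => PySem.Str.isIn word mood_lower) then
    pvW65
  else if (["angry", "frustrated"].any fun word => PySem.Str.isIn word mood_lower) then
    pvW256
  else if (["stressed", "overwhelmed"].any fun word => PySem.Str.isIn word mood_lower) then
    pvW248
  else if (["peaceful", "content", "grateful"].any fun word => PySem.Str.isIn word mood_lower) then
    pvW265
  else
    pvW271

-- ===== PORT B =====
def pvWisdoms : List (List (String × String)) := [pvW247, pvW65, pvW256, pvW248, pvW265, pvW271]

-- keyword -> priority (index into pvWisdoms); keyword lengths are all in [3, 11]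
def pvPrioList : List (String × Int) :=
  [("anxious", 0), ("worried", 0), ("nervous", 0),
   ("sad", 1), ("hopeless", 1), ("down", 1),
   ("angry", 2), ("frustrated", 2),
   ("stressed", 3), ("overwhelmed", 3),
   ("peaceful", 4), ("content", 4), ("grateful", 4)]
def pvPrio : PySem.Dict String Int := PySem.Dict.ofList pvPrioList

def get_quick_gita_wisdom_alt (mood : String) : List (String × String) :=
  let mood_lower := PySem.Str.lower mood
  let n : Int := PySem.Str.len mood_lower
  let best : Int :=
    (PySem.List.pyRange 0 n 1).foldl (fun best i =>
      (PySem.List.pyRange (i + 3) (min (i + 11) n + 1) 1).foldl (fun best j =>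
        let p := PySem.Dict.getD pvPrio (PySem.Str.slice mood_lower (some i) (some j)) 5
        if p < best then p else best) best) 5
  -- WISDOMS[best]: best is always in [0, 5], so this positive-index lookup is exact
  PySem.List.pyGetD pvWisdoms best []

-- ===== PRECONDITION & SPEC =====
def Spec_get_quick_gita_wisdom (mood : String) (out : List (String × String)) : Prop := out = get_quick_gita_wisdom_alt mood
instance (mood : String) (out : List (String × String)) : Decidable (Spec_get_quick_gita_wisdom mood out) := by unfold Spec_get_quick_gita_wisdom; infer_instance

-- ===== CLAIM =====
def Claim_equal_get_quick_gita_wisdom : Prop := ∀ (mood : String), Dom_get_quick_gita_wisdom mood → Spec_get_quick_gita_wisdom mood (get_quick_gita_wisdom mood)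

-- ===== LEMMAS AND PROOFS =====

-- min-fold over Int (the running `if p < best then p else best` accumulator)
def pvMinf (b p : Int) : Int := if p < b then p else b

lemma pvMinf_le_init (l : List Int) (a : Int) : l.foldl pvMinf a ≤ a := by
  induction l generalizing a with
  | nil => simp
  | cons x xs ih =>
    refine le_trans (ih (pvMinf a x)) ?_
    unfold pvMinf; split_ifs <;> omega

lemma pvMinf_le_mem (l : List Int) (a : Int) {x : Int} (hx : x ∈ l) :
    l.foldl pvMinf a ≤ x := by
  induction l generalizing a with
  | nil => cases hx
  | cons y ys ih =>
    rcases List.mem_cons.mp hx with h | h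
    · subst h
      refine le_trans (pvMinf_le_init ys (pvMinf a x)) ?_
      unfold pvMinf; split_ifs <;> omega
    · exact ih _ h

lemma pv_le_minf (l : List Int) (a c : Int) (ha : c ≤ a) (h : ∀ x ∈ l, c ≤ x) :
    c ≤ l.foldl pvMinf a := by
  induction l generalizing a with
  | nil => simpa
  | cons x xs ih =>
    refine ih _ ?_ (fun y hy => h y (List.mem_cons_of_mem _ hy))
    have := h x (List.mem_cons_self ..)
    unfold pvMinf; split_ifs <;> omega

-- the nested range fold IS the min-fold over the flattened value list
lemma pv_foldl_nested (L : List Int) (R : Int → List Int) (g : Int → Int → Int) (a : Int) :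
    L.foldl (fun b i => (R i).foldl (fun b j => if g i j < b then g i j else b) b) a
    = (L.flatMap (fun i => (R i).map (g i))).foldl pvMinf a := by
  induction L generalizing a with
  | nil => simp
  | cons i L ih =>
    simp only [List.foldl_cons, List.flatMap_cons, List.foldl_append, List.foldl_map, ih]
    rfl

-- the flattened list of looked-up priorities for a given (lowercased) mood string
def pvVals (ml : String) : List Int :=
  (PySem.List.pyRange 0 (PySem.Str.len ml) 1).flatMap (fun i =>
    (PySem.List.pyRange (i + 3) (min (i + 11) (PySem.Str.len ml) + 1) 1).map (fun j =>
      PySem.Dict.getD pvPrio (PySem.Str.slice ml (some i) (some j)) 5))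

lemma pv_mem_vals_iff (ml : String) (p : Int) :
    p ∈ pvVals ml ↔ ∃ i j : Int, 0 ≤ i ∧ i < PySem.Str.len ml ∧ i + 3 ≤ j ∧
      j < min (i + 11) (PySem.Str.len ml) + 1 ∧
      p = PySem.Dict.getD pvPrio (PySem.Str.slice ml (some i) (some j)) 5 := by
  unfold pvVals
  simp only [List.mem_flatMap, List.mem_map, PySem.List.mem_pyRange_one]
  constructor
  · rintro ⟨i, ⟨hi0, hin⟩, j, ⟨hj1, hj2⟩, hp⟩
    exact ⟨i, j, hi0, hin, hj1, hj2, hp.symm⟩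
  · rintro ⟨i, j, hi0, hin, hj1, hj2, hp⟩
    exact ⟨i, ⟨hi0, hin⟩, j, ⟨hj1, hj2⟩, hp.symm⟩

-- any admitted slice of ml is an infix of ml, hence a match if it is a keyword
lemma pv_slice_isIn (ml : String) (i j : Int) (hi0 : 0 ≤ i) (hj0 : 0 ≤ j) :
    PySem.Str.isIn (PySem.Str.slice ml (some i) (some j)) ml = true := by
  rw [PySem.Str.isIn_iff_infix, PySem.Str.toList_slice,
      PySem.Chars.slice_eq_listSlice, PySem.List.slice_toNat _ hi0 hj0]
  exact ((List.take_prefix _ _).isInfix.trans (List.drop_suffix _ _).isInfix)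

-- a matched keyword of length 3..11 is found by the substring enumeration
lemma pv_match_slice (ml w : String) (h3 : 3 ≤ w.toList.length) (h11 : w.toList.length ≤ 11)
    (hin : PySem.Str.isIn w ml = true) :
    ∃ i j : Int, 0 ≤ i ∧ i < PySem.Str.len ml ∧ i + 3 ≤ j ∧
      j < min (i + 11) (PySem.Str.len ml) + 1 ∧
      PySem.Str.slice ml (some i) (some j) = w := by
  have hinC : PySem.Chars.isIn w.toList ml.toList = true := by
    rw [PySem.Chars.isIn_iff_infix]
    exact (PySem.Str.isIn_iff_infix ..).mp hin
  obtain ⟨k, hk⟩ := (PySem.Chars.exists_prefix_drop_iff_isIn w.toList ml.toList).mpr hinC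
  have hlen : w.toList.length ≤ ml.toList.length - k := by
    have := hk.length_le; simpa using this
  have hkn : k < ml.toList.length := by omega
  have hml : PySem.Str.len ml = (ml.toList.length : Int) := by
    simp [PySem.Str.len_eq]
  refine ⟨(k : Int), (k : Int) + (w.toList.length : Int), by positivity, ?_, by omega, ?_, ?_⟩
  · rw [hml]; exact_mod_cast hkn
  · rw [hml]; omega
  · apply String.toList_inj.mp
    rw [PySem.Str.toList_slice, PySem.Chars.slice_eq_listSlice,
        PySem.List.slice_natCast_add]
    exact (List.prefix_iff_eq_take.mp hk).symm

-- concrete facts about the priority table, all by computation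
lemma pvPrioList_getD : ∀ p ∈ pvPrioList, PySem.Dict.getD pvPrio p.1 5 = p.2 := by decide

lemma pvPrioList_len : ∀ p ∈ pvPrioList, 3 ≤ p.1.toList.length ∧ p.1.toList.length ≤ 11 := by
  decide

lemma pv_getD_mk_cases {ν : Type} (l : List (String × ν)) (s : String) (d : ν) :
    (PySem.Dict.mk l).getD s d = d ∨ (s, (PySem.Dict.mk l).getD s d) ∈ l := by
  induction l with
  | nil => left; rfl
  | cons p rest ih =>
    rw [PySem.Dict.getD_eq_get?_getD, PySem.Dict.get?_mk_cons]
    by_cases hb : (p.1 == s) = true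
    · right
      rw [if_pos hb]
      have : p.1 = s := eq_of_beq hb
      exact this ▸ (List.mem_cons_self ..)
    · rw [if_neg hb, ← PySem.Dict.getD_eq_get?_getD]
      rcases ih with h | h
      · left; exact h
      · right; exact List.mem_cons_of_mem _ h

set_option maxHeartbeats 1000000 in
lemma pvPrio_eq_mk : pvPrio = PySem.Dict.mk pvPrioList := by decide

lemma pvPrio_cases (s : String) :
    PySem.Dict.getD pvPrio s 5 = 5 ∨ (s, PySem.Dict.getD pvPrio s 5) ∈ pvPrioList := by
  rw [pvPrio_eq_mk]
  exact pv_getD_mk_cases pvPrioList s 5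

lemma pvPrioList_group : ∀ p ∈ pvPrioList,
    (p.2 = 0 ∧ p.1 ∈ ["anxious", "worried", "nervous"]) ∨
    (p.2 = 1 ∧ p.1 ∈ ["sad", "hopeless", "down"]) ∨
    (p.2 = 2 ∧ p.1 ∈ ["angry", "frustrated"]) ∨
    (p.2 = 3 ∧ p.1 ∈ ["stressed", "overwhelmed"]) ∨
    (p.2 = 4 ∧ p.1 ∈ ["peaceful", "content", "grateful"]) := by decide

-- every value scanned is 5 or a listed priority whose keyword matches ml
lemma pv_val_spec (ml : String) (p : Int) (hp : p ∈ pvVals ml) :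
    p = 5 ∨ ∃ w : String, (w, p) ∈ pvPrioList ∧ PySem.Str.isIn w ml = true := by
  obtain ⟨i, j, hi0, _, hj1, _, hp⟩ := (pv_mem_vals_iff ml p).mp hp
  rcases pvPrio_cases (PySem.Str.slice ml (some i) (some j)) with h | h
  · left; omega
  · right
    exact ⟨_, hp ▸ h, pv_slice_isIn ml i j hi0 (by omega)⟩

-- every listed priority whose keyword matches ml is scanned
lemma pv_val_exists (ml w : String) (pr : Int) (hmem : (w, pr) ∈ pvPrioList)
    (hin : PySem.Str.isIn w ml = true) : pr ∈ pvVals ml := by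
  obtain ⟨h3, h11⟩ := pvPrioList_len (w, pr) hmem
  obtain ⟨i, j, hi0, hin', hj1, hj2, hs⟩ := pv_match_slice ml w h3 h11 hin
  refine (pv_mem_vals_iff ml pr).mpr ⟨i, j, hi0, hin', hj1, hj2, ?_⟩
  rw [hs]
  exact (pvPrioList_getD (w, pr) hmem).symm

-- B's result as a function of its computed best index
lemma pv_best_result (ml : String) (k : Int) (h5 : k ≤ 5)
    (hlow : ∀ p ∈ pvVals ml, k ≤ p) (hup : k = 5 ∨ k ∈ pvVals ml) :
    (pvVals ml).foldl pvMinf 5 = k := by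
  refine le_antisymm ?_ (pv_le_minf _ _ _ h5 hlow)
  rcases hup with h | h
  · exact h ▸ pvMinf_le_init _ _
  · exact pvMinf_le_mem _ _ h

-- ===== VERDICT =====
set_option maxRecDepth 8192 in
theorem get_quick_gita_wisdom_spec : Claim_equal_get_quick_gita_wisdom := by
  intro mood _
  show get_quick_gita_wisdom mood = get_quick_gita_wisdom_alt mood
  simp only [get_quick_gita_wisdom, get_quick_gita_wisdom_alt]
  generalize PySem.Str.lower mood = ml
  rw [pv_foldl_nested (g := fun i j =>
        PySem.Dict.getD pvPrio (PySem.Str.slice ml (some i) (some j)) 5)]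
  rw [show ((PySem.List.pyRange 0 (PySem.Str.len ml) 1).flatMap (fun i =>
        (PySem.List.pyRange (i + 3) (min (i + 11) (PySem.Str.len ml) + 1) 1).map (fun j =>
          PySem.Dict.getD pvPrio (PySem.Str.slice ml (some i) (some j)) 5))) = pvVals ml from rfl]
  -- a helper to convert a false `any` into per-keyword non-matches
  have hfalse : ∀ (ws : List String), (ws.any fun w => PySem.Str.isIn w ml) = false →
      ∀ w ∈ ws, PySem.Str.isIn w ml = false := by
    intro ws h w hw
    have := (List.any_eq_false.mp h) w hw
    simpa using this
  have htrue : ∀ (ws : List String), (ws.any fun w => PySem.Str.isIn w ml) = true →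
      ∃ w ∈ ws, PySem.Str.isIn w ml = true := by
    intro ws h; exact List.any_eq_true.mp h
  -- generic branch closer
  have close : ∀ k : Int, k ≤ 5 →
      (∀ p ∈ pvVals ml, k ≤ p) → (k = 5 ∨ k ∈ pvVals ml) →
      PySem.List.pyGetD pvWisdoms ((pvVals ml).foldl pvMinf 5) [] =
        PySem.List.pyGetD pvWisdoms k [] := by
    intro k h5 hlow hup
    rw [pv_best_result ml k h5 hlow hup]
  -- the five group conditions
  by_cases m0 : (["anxious", "worried", "nervous"].any fun w => PySem.Str.isIn w ml) = true
  case pos =>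
    simp only [m0, if_true]
    obtain ⟨w, hw, hin⟩ := htrue _ m0
    rw [close 0 (by omega)
      (fun p hp => by
        rcases pv_val_spec ml p hp with h | ⟨w', hm, _⟩
        · omega
        · rcases pvPrioList_group _ hm with ⟨h, _⟩|⟨h, _⟩|⟨h, _⟩|⟨h, _⟩|⟨h, _⟩ <;> omega)
      (Or.inr (pv_val_exists ml w 0
        (by fin_cases hw <;> decide) hin))]
    rfl
  case neg =>
  rw [Bool.not_eq_true] at m0
  have nm0 := hfalse _ m0
  simp only [m0, Bool.false_eq_true, if_false]
  by_cases m1 : (["sad", "hopeless", "down"].any fun w => PySem.Str.isIn w ml) = true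
  case pos =>
    simp only [m1, if_true]
    obtain ⟨w, hw, hin⟩ := htrue _ m1
    rw [close 1 (by omega)
      (fun p hp => by
        rcases pv_val_spec ml p hp with h | ⟨w', hm, hin'⟩
        · omega
        · rcases pvPrioList_group _ hm with ⟨h, hg⟩|⟨h, _⟩|⟨h, _⟩|⟨h, _⟩|⟨h, _⟩
          · exact absurd hin' (by rw [nm0 w' hg]; simp)
          all_goals omega)
      (Or.inr (pv_val_exists ml w 1 (by fin_cases hw <;> decide) hin))]
    rfl
  case neg =>
  rw [Bool.not_eq_true] at m1
  have nm1 := hfalse _ m1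
  simp only [m1, Bool.false_eq_true, if_false]
  by_cases m2 : (["angry", "frustrated"].any fun w => PySem.Str.isIn w ml) = true
  case pos =>
    simp only [m2, if_true]
    obtain ⟨w, hw, hin⟩ := htrue _ m2
    rw [close 2 (by omega)
      (fun p hp => by
        rcases pv_val_spec ml p hp with h | ⟨w', hm, hin'⟩
        · omega
        · rcases pvPrioList_group _ hm with ⟨h, hg⟩|⟨h, hg⟩|⟨h, _⟩|⟨h, _⟩|⟨h, _⟩
          · exact absurd hin' (by rw [nm0 w' hg]; simp)
          · exact absurd hin' (by rw [nm1 w' hg]; simp)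
          all_goals omega)
      (Or.inr (pv_val_exists ml w 2 (by fin_cases hw <;> decide) hin))]
    rfl
  case neg =>
  rw [Bool.not_eq_true] at m2
  have nm2 := hfalse _ m2
  simp only [m2, Bool.false_eq_true, if_false]
  by_cases m3 : (["stressed", "overwhelmed"].any fun w => PySem.Str.isIn w ml) = true
  case pos =>
    simp only [m3, if_true]
    obtain ⟨w, hw, hin⟩ := htrue _ m3
    rw [close 3 (by omega)
      (fun p hp => by
        rcases pv_val_spec ml p hp with h | ⟨w', hm, hin'⟩
        · omega
        · rcases pvPrioList_group _ hm with ⟨h, hg⟩|⟨h, hg⟩|⟨h, hg⟩|⟨h, _⟩|⟨h, _⟩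
          · exact absurd hin' (by rw [nm0 w' hg]; simp)
          · exact absurd hin' (by rw [nm1 w' hg]; simp)
          · exact absurd hin' (by rw [nm2 w' hg]; simp)
          all_goals omega)
      (Or.inr (pv_val_exists ml w 3 (by fin_cases hw <;> decide) hin))]
    rfl
  case neg =>
  rw [Bool.not_eq_true] at m3
  have nm3 := hfalse _ m3
  simp only [m3, Bool.false_eq_true, if_false]
  by_cases m4 : (["peaceful", "content", "grateful"].any fun w => PySem.Str.isIn w ml) = true
  case pos =>
    simp only [m4, if_true]
    obtain ⟨w, hw, hin⟩ := htrue _ m4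
    rw [close 4 (by omega)
      (fun p hp => by
        rcases pv_val_spec ml p hp with h | ⟨w', hm, hin'⟩
        · omega
        · rcases pvPrioList_group _ hm with ⟨h, hg⟩|⟨h, hg⟩|⟨h, hg⟩|⟨h, hg⟩|⟨h, _⟩
          · exact absurd hin' (by rw [nm0 w' hg]; simp)
          · exact absurd hin' (by rw [nm1 w' hg]; simp)
          · exact absurd hin' (by rw [nm2 w' hg]; simp)
          · exact absurd hin' (by rw [nm3 w' hg]; simp)
          all_goals omega)
      (Or.inr (pv_val_exists ml w 4 (by fin_cases hw <;> decide) hin))]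
    rfl
  case neg =>
  rw [Bool.not_eq_true] at m4
  have nm4 := hfalse _ m4
  simp only [m4, Bool.false_eq_true, if_false]
  rw [close 5 (by omega)
    (fun p hp => by
      rcases pv_val_spec ml p hp with h | ⟨w', hm, hin'⟩
      · omega
      · rcases pvPrioList_group _ hm with ⟨_, hg⟩|⟨_, hg⟩|⟨_, hg⟩|⟨_, hg⟩|⟨_, hg⟩
        · exact absurd hin' (by rw [nm0 w' hg]; simp)
        · exact absurd hin' (by rw [nm1 w' hg]; simp)
        · exact absurd hin' (by rw [nm2 w' hg]; simp)
        · exact absurd hin' (by rw [nm3 w' hg]; simp)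
        · exact absurd hin' (by rw [nm4 w' hg]; simp))
    (Or.inl rfl)]
  rfl
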